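-- pv_equiv track=rewrite | github.com/nitishkthakur/ExcelLineageDetector | BusinessContract/pipeline/formula_converter.py | _convert_if_to_case
-- ===== SOURCE A (Python) =====
-- def _convert_if_to_case(formula: str) -> str:
--     """Convert CASE WHEN(...) to CASE WHEN ... THEN ... ELSE ... END.
--
--     Uses balanced-parenthesis parsing to handle nested function calls
--     like CASE WHEN(SUMIF(A:A,">0"), C, D).
--     """
--     if "CASE WHEN(" not in formula:
--         return formula
--
--     result = []
--     i = 0
--     marker = "CASE WHEN("
--     while i < len(formula):
--         pos = formula.find(marker, i)
--         if pos == -1: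
--             result.append(formula[i:])
--             break
--
--         result.append(formula[i:pos])
--
--         # Find the matching close paren, respecting nesting
--         start = pos + len(marker)
--         depth = 1
--         j = start
--         while j < len(formula) and depth > 0:
--             if formula[j] == "(":
--                 depth += 1
--             elif formula[j] == ")":
--                 depth -= 1
--             j += 1
--
--         if depth != 0:
--             # Unbalanced — leave as-is
--             result.append(formula[pos:j])
--             i = j
--             continue
--
--         inner = formula[start:j - 1]  # content inside CASE WHEN(...)
--
--         # Split on top-level commas (depth=0)
--         parts = _split_top_level(inner, ",")
--         if len(parts) >= 3:
--             cond = parts[0].strip()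
--             then = parts[1].strip()
--             else_ = ",".join(parts[2:]).strip()
--             result.append(f"CASE WHEN {cond} THEN {then} ELSE {else_} END")
--         elif len(parts) == 2:
--             cond = parts[0].strip()
--             then = parts[1].strip()
--             result.append(f"CASE WHEN {cond} THEN {then} END")
--         else:
--             result.append(formula[pos:j])
--
--         i = j
--
--     return "".join(result)
--
-- def _split_top_level(s: str, sep: str) -> list[str]:
--     """Split string on sep, but only at top level (not inside parens)."""
--     parts = []
--     depth = 0
--     start = 0
--     for i, ch in enumerate(s):
--         if ch == "(":
--             depth += 1
--         elif ch == ")":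
--             depth -= 1
--         elif ch == sep and depth == 0:
--             parts.append(s[start:i])
--             start = i + 1
--     parts.append(s[start:])
--     return parts
-- ===== SOURCE B (Python) =====
-- def _convert_if_to_case(formula: str) -> str:
--     """Convert CASE WHEN(...) to CASE WHEN ... THEN ... ELSE ... END.
--
--     Different decomposition from the two-phase original: repeatedly peels
--     off the prefix up to the next marker, then ONE structural scan of the
--     remaining suffix both locates the matching close paren and splits the
--     arguments at top-level commas, leaving the unconsumed suffix for the
--     next round -- no index bookkeeping into the whole string and no
--     separate re-scan for commas.
--     """
--     marker = "CASE WHEN("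
--     out = []
--     s = formula
--     while True:
--         pos = s.find(marker)
--         if pos == -1:
--             out.append(s)
--             break
--         out.append(s[:pos])
--         body = s[pos + len(marker):]
--         parts, cur, depth = [], [], 1
--         rest = None
--         for k, ch in enumerate(body):
--             if ch == "(":
--                 depth += 1
--                 cur.append(ch)
--             elif ch == ")":
--                 if depth == 1:
--                     parts.append("".join(cur))
--                     rest = body[k + 1:]
--                     break
--                 depth -= 1
--                 cur.append(ch)
--             elif ch == "," and depth == 1:
--                 parts.append("".join(cur))
--                 cur = []
--             else:
--                 cur.append(ch)
--         if rest is None: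
--             # unbalanced: keep the tail verbatim and stop
--             out.append(s[pos:])
--             break
--         if len(parts) >= 3:
--             out.append(
--                 f"CASE WHEN {parts[0].strip()} THEN {parts[1].strip()}"
--                 f" ELSE {','.join(parts[2:]).strip()} END"
--             )
--         elif len(parts) == 2:
--             out.append(f"CASE WHEN {parts[0].strip()} THEN {parts[1].strip()} END")
--         else:
--             out.append(marker + body[:len(body) - len(rest)])
--         s = rest
--     return "".join(out)
-- ===== Notes on version B (the rewrite author's own statement) =====
-- stated objective: alternative
-- what changed: A keeps an index into the whole string, finds the matching close paren with one scan and then re-scans the extracted inner slice with _split_top_level; B instead repeatedly peels the prefix up to the next marker off a shrinking suffix and runs ONE structural scan of that suffix which simultaneously locates the matching close paren and splits the arguments at top-level commas, handing the unconsumed tail to the next round.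
import Mathlib
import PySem

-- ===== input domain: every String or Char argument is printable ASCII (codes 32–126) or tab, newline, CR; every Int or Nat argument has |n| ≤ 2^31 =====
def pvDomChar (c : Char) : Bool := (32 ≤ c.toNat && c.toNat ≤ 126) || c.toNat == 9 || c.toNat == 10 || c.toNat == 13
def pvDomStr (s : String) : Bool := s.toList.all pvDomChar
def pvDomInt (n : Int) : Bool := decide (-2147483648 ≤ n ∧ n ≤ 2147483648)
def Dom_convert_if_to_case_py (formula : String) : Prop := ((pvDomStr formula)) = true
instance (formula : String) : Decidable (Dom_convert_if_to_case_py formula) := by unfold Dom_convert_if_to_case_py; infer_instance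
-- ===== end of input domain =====

-- B replaces A's index-based two-phase loop (find the matching paren, then re-scan the inner
-- slice for top-level commas) by peeling a shrinking suffix: one structural scan per marker
-- finds the close paren AND splits the arguments as it goes (objective: alternative).

-- ===== PORT A =====
def pvMarkerA : List Char := "CASE WHEN(".toList

-- while j < len(formula) and depth > 0: …  (returns (j, depth))
def pvACloseScan (cs : List Char) (j : Nat) (depth : Int) : Nat × Int :=
  if h : j < cs.length ∧ 0 < depth then
    let c := cs[j]'h.1
    let d' := if c = '(' then depth + 1 else if c = ')' then depth - 1 else depth
    pvACloseScan cs (j + 1) d'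
  else (j, depth)
termination_by cs.length - j
decreasing_by exact Nat.sub_succ_lt_self _ _ h.1

-- termination helper for pvAMain: the scan never moves backwards
theorem pvACloseScan_ge (cs : List Char) (j : Nat) (d : Int) : j ≤ (pvACloseScan cs j d).1 := by
  fun_induction pvACloseScan with
  | case1 j d h c d' ih => exact Nat.le_of_succ_le ih
  | case2 j d h => exact Nat.le.refl

-- _split_top_level: the body of "for i, ch in enumerate(s)" over the state (parts, depth, start)
def pvASplitStep (s : List Char) (sep : Char) (st : List (List Char) × Int × Int) (p : Int × Char) :
    List (List Char) × Int × Int :=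
  if p.2 = '(' then (st.1, st.2.1 + 1, st.2.2)
  else if p.2 = ')' then (st.1, st.2.1 - 1, st.2.2)
  else if p.2 = sep ∧ st.2.1 = 0 then
    (st.1 ++ [PySem.List.slice s (some st.2.2) (some p.1)], st.2.1, p.1 + 1)
  else st

-- _split_top_level: for i, ch in enumerate(s): …  then parts.append(s[start:])
def pvASplit (s : List Char) (sep : Char) : List (List Char) :=
  let st := (PySem.List.enumerate s).foldl (pvASplitStep s sep) ([], 0, 0)
  st.1 ++ [PySem.List.slice s (some st.2.2) none]

-- termination helper for pvAMain: a successful find is ≥ i, so the scan start is > i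
theorem pvAMainDec (cs : List Char) (i : Nat) (hi : i < cs.length) (pos : Int)
    (hpe : pos = PySem.Chars.findFrom cs pvMarkerA (i : Int) none) (hpos : ¬pos = -1) :
    cs.length - (pvACloseScan cs (pos.toNat + pvMarkerA.length) 1).1 < cs.length - i := by
  apply Nat.sub_lt_sub_left hi
  have h1 : (i : Int) ≤ pos := hpe ▸ (PySem.Chars.findFrom_natCast_spec cs pvMarkerA i (le_of_lt hi) (hpe ▸ hpos)).1
  calc i = ((i : Int)).toNat := (Int.toNat_natCast i).symm
    _ ≤ pos.toNat := Int.toNat_le_toNat h1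
    _ < pos.toNat + pvMarkerA.length := Nat.lt_add_of_pos_right (by decide)
    _ ≤ _ := pvACloseScan_ge cs (pos.toNat + pvMarkerA.length) 1

-- the outer while-loop of A, accumulating `result`
def pvAMain (cs : List Char) (i : Nat) (acc : List (List Char)) : List (List Char) :=
  if hi : i < cs.length then
    let pos := PySem.Chars.findFrom cs pvMarkerA (i : Int) none
    if hpos : pos = -1 then acc ++ [PySem.List.slice cs (some (i : Int)) none]
    else
      let acc1 := acc ++ [PySem.List.slice cs (some (i : Int)) (some pos)]
      let posN := pos.toNat
      let r := pvACloseScan cs (posN + pvMarkerA.length) 1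
      if r.2 ≠ 0 then
        pvAMain cs r.1 (acc1 ++ [PySem.List.slice cs (some (posN : Int)) (some (r.1 : Int))])
      else
        let inner := PySem.List.slice cs (some ((posN + pvMarkerA.length : Nat) : Int)) (some ((r.1 : Int) - 1))
        let parts := pvASplit inner ','
        let piece :=
          match parts with
          | p0 :: p1 :: p2 :: rest =>
              "CASE WHEN ".toList ++ PySem.Chars.strip p0 ++ " THEN ".toList ++ PySem.Chars.strip p1
                ++ " ELSE ".toList ++ PySem.Chars.strip (PySem.Chars.join [','] (p2 :: rest)) ++ " END".toList
          | [p0, p1] =>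
              "CASE WHEN ".toList ++ PySem.Chars.strip p0 ++ " THEN ".toList ++ PySem.Chars.strip p1
                ++ " END".toList
          | _ => PySem.List.slice cs (some (posN : Int)) (some ((r.1 : Int)))
        pvAMain cs r.1 (acc1 ++ [piece])
  else acc
termination_by cs.length - i
decreasing_by
  all_goals exact pvAMainDec cs i hi pos rfl hpos

def convert_if_to_case_py (formula : String) : String :=
  if PySem.Str.isIn "CASE WHEN(" formula = false then formula
  else String.ofList (pvAMain formula.toList 0 []).flatten

-- ===== PORT B =====
def pvMarkerB : List Char := "CASE WHEN(".toList

-- B's structural scan of the suffix after the marker: consumes characters, tracking depth,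
-- and splits at top-level commas as it goes; `none` = ran out of input (unbalanced),
-- `some (rest, parts)` = matching ')' found, with the unconsumed tail and the argument parts.
def pvBScan : List Char → Int → List (List Char) → List Char →
    Option (List Char × List (List Char))
  | [], _, _, _ => none
  | ch :: t, depth, parts, cur =>
    if ch = '(' then pvBScan t (depth + 1) parts (cur ++ [ch])
    else if ch = ')' then
      if depth = 1 then some (t, parts ++ [cur])
      else pvBScan t (depth - 1) parts (cur ++ [ch])
    else if ch = ',' ∧ depth = 1 then pvBScan t depth (parts ++ [cur]) []
    else pvBScan t depth parts (cur ++ [ch])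

-- B's outer loop, peeling the processed prefix off a shrinking suffix.
-- `fuel` is a totality guard only (the top call passes length+1, which never runs out);
-- the algorithm is Source B's: find the marker, one fused scan, recurse on the unconsumed tail.
def pvBGo (fuel : Nat) (s : List Char) : List Char :=
  match fuel with
  | 0 => s
  | fuel + 1 =>
    let pos := PySem.Chars.find s pvMarkerB
    if pos = -1 then s
    else
      let head := s.take pos.toNat           -- s[:pos]
      let body := s.drop (pos.toNat + pvMarkerB.length)   -- s[pos+len(marker):]
      match pvBScan body 1 [] [] with
      | none => head ++ s.drop pos.toNat     -- unbalanced: s[pos:] verbatim, stop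
      | some (rest, parts) =>
          let piece :=
            match parts with
            | p0 :: p1 :: p2 :: ps =>
                "CASE WHEN ".toList ++ PySem.Chars.strip p0 ++ " THEN ".toList ++ PySem.Chars.strip p1
                  ++ " ELSE ".toList ++ PySem.Chars.strip (PySem.Chars.join [','] (p2 :: ps)) ++ " END".toList
            | [p0, p1] =>
                "CASE WHEN ".toList ++ PySem.Chars.strip p0 ++ " THEN ".toList ++ PySem.Chars.strip p1
                  ++ " END".toList
            | _ => pvMarkerB ++ body.take (body.length - rest.length)
          head ++ piece ++ pvBGo fuel rest

def convert_if_to_case_py_alt (formula : String) : String :=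
  String.ofList (pvBGo (formula.toList.length + 1) formula.toList)

-- ===== PRECONDITION & SPEC =====
def Spec_convert_if_to_case_py (formula : String) (out : String) : Prop := out = convert_if_to_case_py_alt formula
instance (formula : String) (out : String) : Decidable (Spec_convert_if_to_case_py formula out) := by unfold Spec_convert_if_to_case_py; infer_instance

-- ===== CLAIM (what is proved, stated in full; the proofs are below) =====
def Claim_equal_convert_if_to_case_py : Prop := ∀ (formula : String), Dom_convert_if_to_case_py formula → Spec_convert_if_to_case_py formula (convert_if_to_case_py formula)

-- ===== LEMMAS AND PROOFS =====

-- proof-only: structural "split at depth-0 commas", (first part, later parts)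
def pvRSplit : List Char → Int → List Char × List (List Char)
  | [], _ => ([], [])
  | c :: t, d =>
    if c = '(' then ((c :: (pvRSplit t (d + 1)).1, (pvRSplit t (d + 1)).2))
    else if c = ')' then ((c :: (pvRSplit t (d - 1)).1, (pvRSplit t (d - 1)).2))
    else if c = ',' ∧ d = 0 then ([], (pvRSplit t d).1 :: (pvRSplit t d).2)
    else ((c :: (pvRSplit t d).1, (pvRSplit t d).2))

theorem pvACloseScan_le_length (cs : List Char) (j : Nat) (d : Int) (h : j ≤ cs.length) :
    (pvACloseScan cs j d).1 ≤ cs.length := by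
  fun_induction pvACloseScan <;> simp_all

theorem pvACloseScan_gt (cs : List Char) (j : Nat) (d : Int) (hd : 0 < d)
    (hz : (pvACloseScan cs j d).2 = 0) : j < (pvACloseScan cs j d).1 := by
  by_cases h : j < cs.length ∧ 0 < d
  · rw [pvACloseScan, dif_pos h]
    exact lt_of_lt_of_le (Nat.lt_succ_self j) (pvACloseScan_ge cs (j + 1) _)
  · rw [pvACloseScan, dif_neg h] at hz
    exact absurd hz (by omega)

theorem pvACloseScan_step (cs : List Char) (j : Nat) (d : Int) (h : j < cs.length ∧ 0 < d) :
    pvACloseScan cs j d =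
      pvACloseScan cs (j + 1)
        (if cs[j]'h.1 = '(' then d + 1 else if cs[j]'h.1 = ')' then d - 1 else d) := by
  rw [pvACloseScan, dif_pos h]

-- an unbalanced scan runs to the end of the string
theorem pvACloseScan_unbalanced (cs : List Char) (j : Nat) (d : Int) :
    j ≤ cs.length → (pvACloseScan cs j d).2 ≠ 0 → 0 < d → (pvACloseScan cs j d).1 = cs.length := by
  fun_induction pvACloseScan with
  | case1 j d h c d' ih =>
      intro hj hz hd
      have hd' : d' = d + 1 ∨ d' = d - 1 ∨ d' = d := by
        simp only [d']; split_ifs <;> simp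
      by_cases hz' : d' = 0
      · rw [hz', pvACloseScan, dif_neg (by simp)] at hz
        exact absurd rfl hz
      · exact ih (by omega) hz (by omega)
  | case2 j d h =>
      intro hj hz hd
      have : ¬ j < cs.length := fun hlt => h ⟨hlt, hd⟩
      simp only []
      omega

-- the inner region seen from j+1, after reading cs[j]
theorem pvSegCons (cs : List Char) (j m : Nat) (hj : j < cs.length) (hjm : j + 1 < m) :
    (cs.take (m - 1)).drop j = cs[j] :: (cs.take (m - 1)).drop (j + 1) := by
  rw [List.drop_eq_getElem_cons (by simp [List.length_take]; omega)]
  congr 1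
  simp [List.getElem_take]

-- B's fused scan, read against A's close-paren scan and the structural split of the inner region
theorem pvBScan_eq (cs : List Char) (n : Nat) : ∀ (j : Nat) (d : Int)
    (parts : List (List Char)) (cur : List Char), cs.length - j = n → j ≤ cs.length → 0 < d →
    pvBScan (cs.drop j) d parts cur =
      (if (pvACloseScan cs j d).2 = 0
       then some (cs.drop (pvACloseScan cs j d).1,
         parts ++ (cur ++ (pvRSplit ((cs.take ((pvACloseScan cs j d).1 - 1)).drop j) (d - 1)).1)
           :: (pvRSplit ((cs.take ((pvACloseScan cs j d).1 - 1)).drop j) (d - 1)).2)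
       else none) := by
  induction n with
  | zero =>
      intro j d parts cur hn hj hd
      have hj' : j = cs.length := by omega
      subst hj'
      rw [List.drop_length, pvACloseScan, dif_neg (by omega)]
      rw [if_neg (by simpa using by omega : ¬ ((cs.length, d).2 = 0))]
      rfl
  | succ m ih =>
      intro j d parts cur hn hj hd
      have hjlt : j < cs.length := by omega
      have hdr : cs.drop j = cs[j] :: cs.drop (j + 1) := List.drop_eq_getElem_cons hjlt
      rw [hdr, pvACloseScan_step cs j d ⟨hjlt, hd⟩]
      by_cases h1 : cs[j] = '('
      · rw [if_pos h1]
        unfold pvBScan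
        rw [if_pos h1, ih (j + 1) (d + 1) parts (cur ++ [cs[j]]) (by omega) (by omega) (by omega)]
        by_cases hz : (pvACloseScan cs (j + 1) (d + 1)).2 = 0
        · rw [if_pos hz, if_pos hz]
          have hgt := pvACloseScan_gt cs (j + 1) (d + 1) (by omega) hz
          rw [pvSegCons cs j _ hjlt (by omega)]
          simp [pvRSplit, h1]
        · rw [if_neg hz, if_neg hz]
      · rw [if_neg h1]
        by_cases h2 : cs[j] = ')'
        · rw [if_pos h2]
          unfold pvBScan
          rw [if_neg h1, if_pos h2]
          by_cases hd1 : d = 1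
          · subst hd1
            rw [if_pos rfl]
            rw [pvACloseScan, dif_neg (by omega)]
            rw [if_pos (by norm_num)]
            simp [pvRSplit]
          · rw [if_neg hd1, ih (j + 1) (d - 1) parts (cur ++ [cs[j]]) (by omega) (by omega) (by omega)]
            by_cases hz : (pvACloseScan cs (j + 1) (d - 1)).2 = 0
            · rw [if_pos hz, if_pos hz]
              have hgt := pvACloseScan_gt cs (j + 1) (d - 1) (by omega) hz
              rw [pvSegCons cs j _ hjlt (by omega)]
              simp [pvRSplit, h2]
            · rw [if_neg hz, if_neg hz]
        · rw [if_neg h2]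
          by_cases h3 : cs[j] = ',' ∧ d = 1
          · obtain ⟨hc, hdd⟩ := h3
            subst hdd
            unfold pvBScan
            rw [if_neg h1, if_neg h2, if_pos ⟨hc, rfl⟩,
              ih (j + 1) 1 (parts ++ [cur]) [] (by omega) (by omega) (by omega)]
            by_cases hz : (pvACloseScan cs (j + 1) 1).2 = 0
            · rw [if_pos hz, if_pos hz]
              have hgt := pvACloseScan_gt cs (j + 1) 1 (by omega) hz
              rw [pvSegCons cs j _ hjlt (by omega)]
              simp [pvRSplit, hc]
            · rw [if_neg hz, if_neg hz]
          · unfold pvBScan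
            rw [if_neg h1, if_neg h2, if_neg h3,
              ih (j + 1) d parts (cur ++ [cs[j]]) (by omega) (by omega) (by omega)]
            by_cases hz : (pvACloseScan cs (j + 1) d).2 = 0
            · rw [if_pos hz, if_pos hz]
              have hgt := pvACloseScan_gt cs (j + 1) d (by omega) hz
              rw [pvSegCons cs j _ hjlt (by omega)]
              have h3' : ¬ (cs[j] = ',' ∧ d - 1 = 0) := by
                intro hcc; exact h3 ⟨hcc.1, by omega⟩
              simp [pvRSplit, h1, h2, h3']
            · rw [if_neg hz, if_neg hz]

theorem pvSliceRefl (s : List Char) (k : Nat) :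
    PySem.List.slice s (some (k : Int)) (some (k : Int)) = [] := by
  rw [PySem.List.slice_natCast]
  simp

theorem pvSliceSnoc (s : List Char) (start k : Nat) (h1 : start ≤ k) (h2 : k < s.length) :
    PySem.List.slice s (some (start : Int)) (some ((k + 1 : Nat) : Int)) =
      PySem.List.slice s (some (start : Int)) (some ((k : Nat) : Int)) ++ [s[k]] := by
  rw [PySem.List.slice_natCast, PySem.List.slice_natCast]
  rw [show k + 1 - start = (k - start) + 1 from by omega, List.take_add_one]
  congr 1
  rw [List.getElem?_drop, show start + (k - start) = k from by omega,
    List.getElem?_eq_getElem h2]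
  rfl

-- the split loop, generalized over the position reached in s
theorem pvASplit_loop (s : List Char) (t : List Char) : ∀ (k : Nat) (parts : List (List Char)) (depth : Int) (start : Nat),
    t = s.drop k → start ≤ k →
    (((PySem.List.enumerate t (k : Int)).foldl (pvASplitStep s ',') (parts, depth, (start : Int))).1 ++
      [PySem.List.slice s (some (((PySem.List.enumerate t (k : Int)).foldl (pvASplitStep s ',') (parts, depth, (start : Int))).2.2)) none]) =
    parts ++ ((PySem.List.slice s (some (start : Int)) (some (k : Int)) ++ (pvRSplit t depth).1)
      :: (pvRSplit t depth).2) := by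
  induction t with
  | nil =>
      intro k parts depth start ht hs
      have hk : s.length ≤ k := by
        have := congrArg List.length ht
        simp at this
        omega
      rw [PySem.List.enumerate_nil]
      simp only [List.foldl_nil]
      rw [PySem.List.slice_from _ (by positivity), PySem.List.slice_natCast, pvRSplit]
      simp [List.take_of_length_le (by simp; omega : (s.drop start).length ≤ k - start)]
  | cons c t' ih =>
      intro k parts depth start ht hs
      have hk : k < s.length := by
        have := congrArg List.length ht
        simp at this
        omega
      have hdr : s.drop k = s[k] :: s.drop (k + 1) := List.drop_eq_getElem_cons hk
      rw [← ht] at hdr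
      have hc : c = s[k] := (List.cons.injEq _ _ _ _ ▸ hdr).1
      have ht' : t' = s.drop (k + 1) := (List.cons.injEq _ _ _ _ ▸ hdr).2
      subst hc
      rw [PySem.List.enumerate_cons, List.foldl_cons,
        show ((k : Int) + 1) = ((k + 1 : Nat) : Int) from by push_cast; ring]
      by_cases h1 : s[k] = '('
      · rw [show pvASplitStep s ',' (parts, depth, (start : Int)) ((k : Int), s[k])
              = (parts, depth + 1, (start : Int)) from by simp [pvASplitStep, h1]]
        rw [ih (k + 1) parts (depth + 1) start ht' (by omega)]
        rw [pvSliceSnoc s start k hs hk, pvRSplit]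
        simp [h1]
      · by_cases h2 : s[k] = ')'
        · rw [show pvASplitStep s ',' (parts, depth, (start : Int)) ((k : Int), s[k])
                = (parts, depth - 1, (start : Int)) from by simp [pvASplitStep, h2]]
          rw [ih (k + 1) parts (depth - 1) start ht' (by omega)]
          rw [pvSliceSnoc s start k hs hk, pvRSplit]
          simp [h2]
        · by_cases h3 : s[k] = ',' ∧ depth = 0
          · rw [show pvASplitStep s ',' (parts, depth, (start : Int)) ((k : Int), s[k])
                  = (parts ++ [PySem.List.slice s (some (start : Int)) (some ((k : Nat) : Int))], depth, ((k + 1 : Nat) : Int)) from by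
                simp [pvASplitStep, h3.1, h3.2]]
            rw [ih (k + 1) _ depth (k + 1) ht' (by omega)]
            rw [pvSliceRefl, pvRSplit]
            simp [h3.1, h3.2]
          · rw [show pvASplitStep s ',' (parts, depth, (start : Int)) ((k : Int), s[k])
                  = (parts, depth, (start : Int)) from by
                simp [pvASplitStep, h1, h2]; intro hcc; exact fun hd => absurd ⟨hcc, hd⟩ h3]
            rw [ih (k + 1) parts depth start ht' (by omega)]
            rw [pvSliceSnoc s start k hs hk, pvRSplit]
            have h3' : ¬(s[k] = ',' ∧ depth = 0) := h3
            simp [h1, h2, h3']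

-- A's two-phase split equals the structural split
theorem pvASplit_eq (s : List Char) :
    pvASplit s ',' = (pvRSplit s 0).1 :: (pvRSplit s 0).2 := by
  have h := pvASplit_loop s s 0 [] 0 0 (by simp) (le_refl 0)
  simp only [Nat.cast_zero] at h
  unfold pvASplit
  rw [h]
  simp [show PySem.List.slice s (some 0) (some 0) = [] from by simpa using pvSliceRefl s 0]

-- a slice starting at an occurrence of the marker is the marker plus the rest of the slice
theorem pvSliceMarker (cs : List Char) (p e : Nat) (hpre : pvMarkerA <+: cs.drop p)
    (he : p + pvMarkerA.length ≤ e) :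
    PySem.List.slice cs (some (p : Int)) (some (e : Int)) =
      pvMarkerA ++ PySem.List.slice cs (some ((p + pvMarkerA.length : Nat) : Int)) (some (e : Int)) := by
  rw [PySem.List.slice_natCast, PySem.List.slice_natCast]
  obtain ⟨tl, htl⟩ := hpre
  have htl2 : List.drop (p + pvMarkerA.length) cs = tl := by
    rw [← List.drop_drop, ← htl, List.drop_left]
  rw [show e - p = pvMarkerA.length + (e - (p + pvMarkerA.length)) from by omega, ← htl, htl2,
    List.take_append, List.take_of_length_le (Nat.le_add_right _ _), Nat.add_sub_cancel_left]

-- the two outer loops agree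
theorem pvMain_eq (cs : List Char) (n : Nat) : ∀ (j : Nat) (acc : List (List Char)) (fuel : Nat),
    cs.length - j = n → j ≤ cs.length → cs.length - j < fuel →
    (pvAMain cs j acc).flatten = acc.flatten ++ pvBGo fuel (cs.drop j) := by
  induction n using Nat.strong_induction_on with
  | _ n ih =>
    intro j acc fuel hn hj hfuel
    obtain ⟨f, rfl⟩ : ∃ f, fuel = f + 1 := ⟨fuel - 1, by omega⟩
    have hfr := PySem.Chars.findFrom_natCast cs pvMarkerA j hj
    by_cases hjlt : j < cs.length
    case neg =>
      have hj' : j = cs.length := by omega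
      subst hj'
      rw [pvAMain, dif_neg (by omega), List.drop_length, pvBGo]
      rw [if_pos (by
        rw [PySem.Chars.find_eq_neg_one_iff]
        intro hinf
        have := hinf.length_le
        simp [pvMarkerB] at this)]
      simp
    case pos =>
    rw [pvAMain, dif_pos hjlt]
    rw [pvBGo]
    by_cases hfind : PySem.Chars.find (cs.drop j) pvMarkerB = -1
    · rw [if_pos hfind]
      rw [dif_pos (by rw [hfr]; simp [show pvMarkerA = pvMarkerB from rfl, hfind])]
      simp
    · rw [if_neg hfind]
      have hposA : PySem.Chars.findFrom cs pvMarkerA (j : Int) none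
          = (j : Int) + PySem.Chars.find (cs.drop j) pvMarkerB := by
        rw [hfr]; simp [show pvMarkerA = pvMarkerB from rfl, hfind]
      have hfnn : 0 ≤ PySem.Chars.find (cs.drop j) pvMarkerB :=
        (PySem.Chars.find_nonneg_iff _ _).mpr
          ((PySem.Chars.find_ne_neg_one_iff _ _).mp hfind)
      set pB : Int := PySem.Chars.find (cs.drop j) pvMarkerB with hpB
      have hposA_ne : PySem.Chars.findFrom cs pvMarkerA (j : Int) none ≠ -1 := by
        rw [hposA]; omega
      rw [dif_neg hposA_ne]
      simp only []
      have hfs := PySem.Chars.find_spec hfnn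
      have hPN : (PySem.Chars.findFrom cs pvMarkerA (j : Int) none).toNat = j + pB.toNat := by
        rw [hposA]; omega
      have hpre : pvMarkerA <+: cs.drop (j + pB.toNat) := by
        rw [← List.drop_drop]
        exact hfs.1
      have hm : pvMarkerA.length = 10 := rfl
      have hlenpre : j + pB.toNat + pvMarkerA.length ≤ cs.length := by
        have h10 := hpre.length_le
        rw [List.length_drop] at h10
        omega
      set start : Nat := j + pB.toNat + pvMarkerA.length with hstart
      have hstart_eq : (PySem.Chars.findFrom cs pvMarkerA (j : Int) none).toNat + pvMarkerA.length = start := by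
        rw [hPN]
      have hbody : (cs.drop j).drop (pB.toNat + pvMarkerB.length) = cs.drop start := by
        rw [List.drop_drop]
        congr 1
        try rw [show pvMarkerB.length = pvMarkerA.length from rfl, hstart]
        try omega
      have hhead : PySem.List.slice cs (some (j : Int)) (some (PySem.Chars.findFrom cs pvMarkerA (j : Int) none))
          = (cs.drop j).take pB.toNat := by
        rw [hposA, show (j : Int) + pB = ((j + pB.toNat : Nat) : Int) from by omega,
          PySem.List.slice_natCast, show j + pB.toNat - j = pB.toNat from by omega]
      have hscan := pvBScan_eq cs (cs.length - start) start 1 [] [] rfl (by omega) (by norm_num)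
      rw [hstart_eq, hPN, hhead, hbody]
      set r := pvACloseScan cs start 1 with hr
      have hr1_le : r.1 ≤ cs.length := by
        rw [hr]; exact pvACloseScan_le_length cs start 1 (by omega)
      have hr1_gt : start ≤ r.1 := by rw [hr]; exact pvACloseScan_ge cs start 1
      have hih := ih (cs.length - r.1) (by omega) r.1
      by_cases hz : r.2 = 0
      · -- balanced
        rw [if_pos hz] at hscan
        rw [if_neg (show ¬ r.2 ≠ 0 by simpa using hz), hscan]
        have hgt : start < r.1 := by
          rw [hr]; exact pvACloseScan_gt cs start 1 (by norm_num) (hr ▸ hz)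
        have hinner : PySem.List.slice cs (some ((start : Nat) : Int)) (some ((r.1 : Int) - 1))
            = (cs.take (r.1 - 1)).drop start := by
          rw [show ((r.1 : Int) - 1) = ((r.1 - 1 : Nat) : Int) from by omega,
            PySem.List.slice_natCast, List.drop_take]
        rw [hinner, pvASplit_eq]
        have hfb : PySem.List.slice cs (some ((j + pB.toNat : Nat) : Int)) (some ((r.1 : Int)))
            = pvMarkerB ++ (cs.drop start).take ((cs.drop start).length - (cs.drop r.1).length) := by
          rw [show ((r.1 : Int)) = ((r.1 : Nat) : Int) from rfl,
            pvSliceMarker cs (j + pB.toNat) r.1 hpre (by omega)]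
          congr 1
          rw [PySem.List.slice_natCast]
          congr 1
          rw [List.length_drop, List.length_drop, hstart]
          omega
        simp only [show ((1 : Int) - 1) = 0 from by norm_num, List.nil_append] at hscan ⊢
        set seg := (cs.take (r.1 - 1)).drop start with hseg
        set sp := pvRSplit seg 0 with hsp
        rcases hsp2 : sp.2 with _ | ⟨p1, ps2⟩
        · rw [hih _ f rfl (by omega) (by omega), hfb]
          simp [List.append_assoc]
        · rcases hps2 : ps2 with _ | ⟨p2, ps3⟩
          · rw [hih _ f rfl (by omega) (by omega)]
            simp [List.append_assoc]
          · rw [hih _ f rfl (by omega) (by omega)]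
            simp [List.append_assoc]
      · -- unbalanced: A appends cs[pos:len] and recurses at len; B stops
        rw [if_neg hz] at hscan
        rw [if_pos hz, hscan]
        have hr1 : r.1 = cs.length := by
          rw [hr]
          exact pvACloseScan_unbalanced cs start 1 (by omega) (hr ▸ hz) (by norm_num)
        rw [pvAMain, dif_neg (by omega)]
        have hsl : PySem.List.slice cs (some ((j + pB.toNat : Nat) : Int)) (some ((r.1 : Nat) : Int))
            = List.drop pB.toNat (List.drop j cs) := by
          rw [hr1, PySem.List.slice_natCast, List.drop_drop, List.take_of_length_le (by simp)]
        rw [hsl]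
        simp [List.append_assoc]

-- ===== VERDICT (by name: the statement is the Claim_ definition above) =====
theorem convert_if_to_case_py_spec : Claim_equal_convert_if_to_case_py := by
  intro formula _
  unfold Spec_convert_if_to_case_py convert_if_to_case_py convert_if_to_case_py_alt
  by_cases hin : PySem.Str.isIn "CASE WHEN(" formula = false
  · rw [if_pos hin]
    have hnin : ¬ ("CASE WHEN(".toList <:+: formula.toList) := by
      rw [PySem.Str.isIn_eq] at hin
      exact (PySem.Chars.isIn_eq_false_iff _ _).mp hin
    have hfind : PySem.Chars.find formula.toList pvMarkerB = -1 :=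
      (PySem.Chars.find_eq_neg_one_iff _ _).mpr hnin
    rw [pvBGo, if_pos hfind]
    simp
  · rw [if_neg hin]
    have h := pvMain_eq formula.toList formula.toList.length 0 []
      (formula.toList.length + 1) (by simp) (Nat.zero_le _) (by omega)
    rw [show formula.toList.drop 0 = formula.toList from by simp] at h
    rw [h]
    simp
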